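-- pv_equiv track=rewrite | github.com/zsc/ai_book_yellow_page | .tools/sync_yellow_page.py | detect_entry
-- ===== SOURCE A (Python) =====
-- from typing import Any, Dict, Iterable, List, Optional, Sequence, Tuple
--
-- def detect_entry(files: Sequence[str], priority: Sequence[str]) -> Optional[str]:
--     lower_to_real = {f.lower(): f for f in files}
--     for want in priority:
--         if want.lower() in lower_to_real:
--             return lower_to_real[want.lower()]
--     # fallback: first html file
--     for f in files:
--         if f.lower().endswith(".html"):
--             return f
--     return None
-- ===== SOURCE B (Python) =====
-- def detect_entry(files, priority):
--     # first-occurrence index of each lowered priority name, then a single pass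
--     # over files keeping (smallest matching priority index, last file achieving
--     # it) plus the first .html file; decide at the end
--     pos = {}
--     for i, p in enumerate(priority):
--         pos.setdefault(p.lower(), i)
--     best = None        # (priority_index, real_filename)
--     first_html = None
--     for f in files:
--         fl = f.lower()
--         i = pos.get(fl)
--         if i is not None and (best is None or i <= best[0]):
--             best = (i, f)
--         if first_html is None and fl.endswith(".html"):
--             first_html = f
--     return best[1] if best is not None else first_html
-- ===== Notes on version B (the rewrite author's own statement) =====
-- stated objective: alternative
-- what changed: Inverts the loop structure: instead of A's lowercase-to-real dict over files plus a scan over priority plus a separate html scan, B indexes priority by first-occurrence rank and makes one pass over files with an accumulator holding (smallest matching priority rank, last file achieving it) and the first html file, deciding at the end.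
import Mathlib
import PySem

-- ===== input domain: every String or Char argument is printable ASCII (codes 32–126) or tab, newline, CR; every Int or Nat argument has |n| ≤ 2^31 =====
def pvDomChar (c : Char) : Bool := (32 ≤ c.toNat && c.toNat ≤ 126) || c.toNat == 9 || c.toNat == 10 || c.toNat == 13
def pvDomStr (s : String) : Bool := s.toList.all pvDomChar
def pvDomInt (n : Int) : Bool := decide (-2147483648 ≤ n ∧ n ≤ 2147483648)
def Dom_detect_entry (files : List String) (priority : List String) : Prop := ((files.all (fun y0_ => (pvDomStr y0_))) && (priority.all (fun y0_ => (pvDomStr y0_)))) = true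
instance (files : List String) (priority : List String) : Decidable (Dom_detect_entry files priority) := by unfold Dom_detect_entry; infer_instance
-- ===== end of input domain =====

-- B inverts the loop structure (one pass over files with a best-(index,file)/first-html accumulator,
-- no lowercase-to-real dict); objective: alternative, same behaviour.

-- ===== PORT A =====
-- first loop of A: for want in priority: if want.lower() in d: return d[want.lower()]
def detectA_prio (d : PySem.Dict String String) : List String → Option String
  | [] => none
  | w :: rest =>
    match d.get? (PySem.Str.lower w) with
    | some v => some v
    | none => detectA_prio d rest

-- second loop of A: for f in files: if f.lower().endswith(".html"): return f
def detectA_html : List String → Option String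
  | [] => none
  | f :: rest =>
    if PySem.Str.endswith (PySem.Str.lower f) ".html" then some f else detectA_html rest

def detect_entry (files : List String) (priority : List String) : Option String :=
  let lower_to_real : PySem.Dict String String :=
    files.foldl (fun d f => d.insert (PySem.Str.lower f) f) PySem.Dict.empty
  match detectA_prio lower_to_real priority with
  | some v => some v
  | none => detectA_html files

-- ===== PORT B =====
-- B's first loop: pos.setdefault(p.lower(), i) over enumerate(priority)
-- (the enumerate counter is a list position, kept as Nat)
def buildPos : List String → Nat → PySem.Dict String Nat → PySem.Dict String Nat
  | [], _, d => d
  | p :: rest, i, d =>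
    let k := PySem.Str.lower p
    let d' := match d.get? k with
              | some _ => d
              | none => d.insert k i
    buildPos rest (i + 1) d'

-- the body of B's single for-loop over files, acting on the state (best, first_html)
def stepB (pos : PySem.Dict String Nat) (st : Option (Nat × String) × Option String) (f : String) :
    Option (Nat × String) × Option String :=
  let fl := PySem.Str.lower f
  let best :=
    match pos.get? fl, st.1 with
    | some i, none => some (i, f)
    | some i, some (j, g) => if i ≤ j then some (i, f) else some (j, g)
    | none, b => b
  let html :=
    match st.2 with
    | none => if PySem.Str.endswith fl ".html" then some f else none
    | some h => some h
  (best, html)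

def detect_entry_alt (files : List String) (priority : List String) : Option String :=
  let pos := buildPos priority 0 PySem.Dict.empty
  let st := files.foldl (stepB pos) (none, none)
  match st.1 with
  | some (_, g) => some g
  | none => st.2

-- ===== PRECONDITION & SPEC =====
def Spec_detect_entry (files : List String) (priority : List String) (out : Option String) : Prop := out = detect_entry_alt files priority
instance (files : List String) (priority : List String) (out : Option String) : Decidable (Spec_detect_entry files priority out) := by unfold Spec_detect_entry; infer_instance

-- ===== CLAIM (what is proved, stated in full; the proofs are below) =====
def Claim_equal_detect_entry : Prop := ∀ (files : List String) (priority : List String), Dom_detect_entry files priority → Spec_detect_entry files priority (detect_entry files priority)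

-- ===== LEMMAS AND PROOFS =====

-- A's dict answers like a first-match scan of the reversed file list (last insert wins)
theorem foldl_insert_get (files : List String) (d : PySem.Dict String String) (k : String) :
    (files.foldl (fun d f => d.insert (PySem.Str.lower f) f) d).get? k
      = match files.reverse.find? (fun f => PySem.Str.lower f == k) with
        | some v => some v
        | none => d.get? k := by
  induction files generalizing d with
  | nil => simp
  | cons f rest ih =>
    simp only [List.foldl_cons, List.reverse_cons, List.find?_append, ih]
    cases h : rest.reverse.find? (fun f => PySem.Str.lower f == k) with
    | some v => simp
    | none =>
      rw [PySem.Dict.get?_insert]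
      by_cases hk : PySem.Str.lower f = k
      · simp [List.find?, hk]
      · simp [beq_iff_eq, hk]
        intro hke; exact absurd hke.symm hk

-- just the best-component of B's loop
def updB (lowers : List String) (b : Option (Nat × String)) (f : String) : Option (Nat × String) :=
  match PySem.List.index? lowers (PySem.Str.lower f), b with
  | some i, none => some (i, f)
  | some i, some (j, g) => if i ≤ j then some (i, f) else some (j, g)
  | none, b => b

-- just the html-component of B's loop
def updH (h : Option String) (f : String) : Option String :=
  match h with
  | none => if PySem.Str.endswith (PySem.Str.lower f) ".html" then some f else none
  | some g => some g

-- evaluation lemmas for updB (used instead of unfolding, so simp's index? bridge does not interfere)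
theorem updB_no_idx (ls : List String) (f : String)
    (h : PySem.List.index? ls (PySem.Str.lower f) = none) (b : Option (Nat × String)) :
    updB ls b f = b := by
  unfold updB; rw [h]

theorem updB_idx_none (ls : List String) (f : String) (i : Nat)
    (h : PySem.List.index? ls (PySem.Str.lower f) = some i) :
    updB ls none f = some (i, f) := by
  unfold updB; rw [h]

theorem updB_idx_some (ls : List String) (f : String) (i j : Nat) (g : String)
    (h : PySem.List.index? ls (PySem.Str.lower f) = some i) :
    updB ls (some (j, g)) f = if i ≤ j then some (i, f) else some (j, g) := by
  unfold updB; rw [h]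

-- index? facts specialised to the head of the lowered priority list
theorem idx_head (lw : String) (lrest : List String) (f : String)
    (hf : PySem.Str.lower f = lw) :
    PySem.List.index? (lw :: lrest) (PySem.Str.lower f) = some 0 := by
  rw [hf]; exact PySem.List.index?_cons_self lw lrest

theorem idx_tail (lw : String) (lrest : List String) (f : String)
    (hf : PySem.Str.lower f ≠ lw) :
    PySem.List.index? (lw :: lrest) (PySem.Str.lower f)
      = (PySem.List.index? lrest (PySem.Str.lower f)).map (· + 1) :=
  PySem.List.index?_cons_of_ne _ (Ne.symm hf)

-- find? over one element, by the head predicate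
theorem find?_single_pos (lw : String) (f : String) (hf : PySem.Str.lower f = lw) :
    List.find? (fun x => PySem.Str.lower x == lw) [f] = some f := by
  have hpt : (PySem.Str.lower f == lw) = true := by rw [hf]; exact beq_self_eq_true lw
  simp only [List.find?]; rw [hpt]

theorem find?_single_neg (lw : String) (f : String) (hf : PySem.Str.lower f ≠ lw) :
    List.find? (fun x => PySem.Str.lower x == lw) [f] = none := by
  have hpf : (PySem.Str.lower f == lw) = false := by
    simp only [beq_eq_false_iff_ne, ne_eq]; exact hf
  simp only [List.find?]; rw [hpf]

-- the setdefault-built dict answers with the FIRST index of the key in the lowered priority list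
theorem buildPos_get (ps : List String) (i : Nat) (d : PySem.Dict String Nat) (k : String) :
    (buildPos ps i d).get? k
      = match d.get? k with
        | some v => some v
        | none => (PySem.List.index? (ps.map PySem.Str.lower) k).map (· + i) := by
  induction ps generalizing i d with
  | nil =>
    have hnone : PySem.List.index? (([] : List String).map PySem.Str.lower) k = none := by
      rw [PySem.List.index?_eq_none_iff]; simp
    rw [hnone]
    show d.get? k = _
    cases hd : d.get? k <;> rfl
  | cons p rest ih =>
    simp only [buildPos, List.map_cons]
    by_cases hk : k = PySem.Str.lower p
    · have hhead : PySem.List.index? (PySem.Str.lower p :: rest.map PySem.Str.lower) k = some 0 := by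
        rw [hk]; exact PySem.List.index?_cons_self _ _
      rw [hhead]
      cases hd : d.get? k with
      | some v =>
        rw [← hk, hd]
        rw [ih, hd]
      | none =>
        rw [← hk, hd, ih]
        have : (d.insert k i).get? k = some i := by
          rw [PySem.Dict.get?_insert]; simp
        rw [this]
        simp
    · have htail : PySem.List.index? (PySem.Str.lower p :: rest.map PySem.Str.lower) k
          = (PySem.List.index? (rest.map PySem.Str.lower) k).map (· + 1) :=
        PySem.List.index?_cons_of_ne _ (fun he => hk he.symm)
      rw [htail]
      have hpres : ∀ d0 : PySem.Dict String Nat,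
          (match d0.get? (PySem.Str.lower p) with
           | some _ => d0
           | none => d0.insert (PySem.Str.lower p) i).get? k = d0.get? k := by
        intro d0
        cases hp : d0.get? (PySem.Str.lower p) with
        | some v => rfl
        | none =>
          rw [PySem.Dict.get?_insert]
          simp [hk]
      rw [ih, hpres d]
      cases d.get? k with
      | some v => rfl
      | none =>
        cases PySem.List.index? (rest.map PySem.Str.lower) k with
        | none => rfl
        | some j =>
          simp only [Option.map_some]
          rw [show j + 1 + i = j + (i + 1) from by omega]

-- B's per-file step splits into the two independent components, with get? pos = index? lowers
theorem stepB_eq (priority : List String) (st : Option (Nat × String) × Option String)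
    (f : String) :
    stepB (buildPos priority 0 PySem.Dict.empty) st f
      = (updB (priority.map PySem.Str.lower) st.1 f, updH st.2 f) := by
  have hg : (buildPos priority 0 PySem.Dict.empty).get? (PySem.Str.lower f)
      = PySem.List.index? (priority.map PySem.Str.lower) (PySem.Str.lower f) := by
    rw [buildPos_get]
    have he : (PySem.Dict.empty : PySem.Dict String Nat).get? (PySem.Str.lower f) = none := rfl
    rw [he]
    cases PySem.List.index? (priority.map PySem.Str.lower) (PySem.Str.lower f) <;> simp
  simp only [stepB, updB, updH]
  rw [hg]

theorem fold_stepB_split (priority : List String) (files : List String)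
    (b : Option (Nat × String)) (h : Option String) :
    files.foldl (stepB (buildPos priority 0 PySem.Dict.empty)) (b, h)
      = (files.foldl (updB (priority.map PySem.Str.lower)) b, files.foldl updH h) := by
  induction files generalizing b h with
  | nil => rfl
  | cons f rest ih => rw [List.foldl_cons, stepB_eq, List.foldl_cons, List.foldl_cons, ih]

theorem foldH_some (files : List String) (g : String) :
    files.foldl updH (some g) = some g := by
  induction files with
  | nil => rfl
  | cons f rest ih => simpa [updH] using ih

theorem foldH_eq_detectA_html (files : List String) :
    files.foldl updH none = detectA_html files := by
  induction files with
  | nil => rfl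
  | cons f rest ih =>
    rw [List.foldl_cons, detectA_html]
    have hu : updH none f
        = if PySem.Str.endswith (PySem.Str.lower f) ".html" = true then some f else none := by
      unfold updH
      cases PySem.Str.endswith (PySem.Str.lower f) ".html" <;> rfl
    rw [hu]
    cases hf : PySem.Str.endswith (PySem.Str.lower f) ".html"
    · simpa using ih
    · simp [foldH_some]

-- once the best index is 0, files matching head keep overwriting it, others are ignored
theorem foldB_zero (lw : String) (lrest : List String) (files : List String) (g : String) :
    files.foldl (updB (lw :: lrest)) (some (0, g))
      = some (0, match files.reverse.find? (fun x => PySem.Str.lower x == lw) with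
                 | some h => h
                 | none => g) := by
  induction files generalizing g with
  | nil => rfl
  | cons f rest ih =>
    simp only [List.foldl_cons, List.reverse_cons, List.find?_append]
    by_cases hf : PySem.Str.lower f = lw
    · rw [updB_idx_some _ _ 0 0 g (idx_head lw lrest f hf), if_pos (Nat.le_refl 0), ih f,
        find?_single_pos lw f hf]
      cases h : rest.reverse.find? (fun x => PySem.Str.lower x == lw)
      · simp
      · simp
    · have hstep : updB (lw :: lrest) (some (0, g)) f = some (0, g) := by
        cases hi : PySem.List.index? lrest (PySem.Str.lower f) with
        | none =>
          have h2 : PySem.List.index? (lw :: lrest) (PySem.Str.lower f) = none := by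
            rw [idx_tail lw lrest f hf, hi]; rfl
          exact updB_no_idx _ _ h2 _
        | some i =>
          have h2 : PySem.List.index? (lw :: lrest) (PySem.Str.lower f) = some (i + 1) := by
            rw [idx_tail lw lrest f hf, hi]; rfl
          rw [updB_idx_some _ _ (i + 1) 0 g h2, if_neg (by omega)]
      rw [hstep, ih g, find?_single_neg lw f hf]
      cases h : rest.reverse.find? (fun x => PySem.Str.lower x == lw)
      · simp
      · simp

-- while no file matched head yet but some later file does, the fold ends at index 0 with the last head-match
theorem foldB_reach_zero (lw : String) (lrest : List String) (files : List String)
    (b : Option (Nat × String))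
    (hb : b = none ∨ ∃ j g, b = some (j, g) ∧ 0 < j)
    (hex : ∃ f ∈ files, PySem.Str.lower f = lw) (h : String)
    (hfind : files.reverse.find? (fun x => PySem.Str.lower x == lw) = some h) :
    files.foldl (updB (lw :: lrest)) b = some (0, h) := by
  induction files generalizing b with
  | nil => exact absurd hex (by simp)
  | cons f rest ih =>
    simp only [List.foldl_cons]
    by_cases hf : PySem.Str.lower f = lw
    · have hidx := idx_head lw lrest f hf
      have hstep : updB (lw :: lrest) b f = some (0, f) := by
        rcases hb with hb | ⟨j, g, hb, hj⟩
        · rw [hb]; exact updB_idx_none _ _ 0 hidx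
        · rw [hb, updB_idx_some _ _ 0 j g hidx, if_pos (Nat.zero_le j)]
      rw [hstep, foldB_zero]
      have heq : (f :: rest).reverse.find? (fun x => PySem.Str.lower x == lw)
          = some (match rest.reverse.find? (fun x => PySem.Str.lower x == lw) with
                  | some h' => h' | none => f) := by
        simp only [List.reverse_cons, List.find?_append, find?_single_pos lw f hf]
        cases h' : rest.reverse.find? (fun x => PySem.Str.lower x == lw)
        · simp
        · simp
      rw [heq] at hfind
      injection hfind with hfind
      rw [← hfind]
    · have hrest : ∃ x ∈ rest, PySem.Str.lower x = lw := by
        rcases hex with ⟨x, hx, hxl⟩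
        rcases List.mem_cons.mp hx with rfl | hx
        · exact absurd hxl hf
        · exact ⟨x, hx, hxl⟩
      have hfind' : rest.reverse.find? (fun x => PySem.Str.lower x == lw) = some h := by
        rw [List.reverse_cons, List.find?_append, find?_single_neg lw f hf] at hfind
        cases hy : rest.reverse.find? (fun x => PySem.Str.lower x == lw) with
        | none => rw [hy] at hfind; simp at hfind
        | some y => rw [hy] at hfind; simpa using hfind
      have hb' : updB (lw :: lrest) b f = none ∨
          ∃ j g, updB (lw :: lrest) b f = some (j, g) ∧ 0 < j := by
        cases hi : PySem.List.index? lrest (PySem.Str.lower f) with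
        | none =>
          have h2 : PySem.List.index? (lw :: lrest) (PySem.Str.lower f) = none := by
            rw [idx_tail lw lrest f hf, hi]; rfl
          rw [updB_no_idx _ _ h2]
          exact hb
        | some i =>
          have h2 : PySem.List.index? (lw :: lrest) (PySem.Str.lower f) = some (i + 1) := by
            rw [idx_tail lw lrest f hf, hi]; rfl
          right
          rcases hb with hb | ⟨j, g, hb, hj⟩
          · exact ⟨i + 1, f, by rw [hb]; exact updB_idx_none _ _ (i + 1) h2, by omega⟩
          · by_cases hij : i + 1 ≤ j
            · exact ⟨i + 1, f, by rw [hb, updB_idx_some _ _ (i + 1) j g h2, if_pos hij], by omega⟩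
            · exact ⟨j, g, by rw [hb, updB_idx_some _ _ (i + 1) j g h2, if_neg hij], hj⟩
      exact ih _ hb' hrest hfind'

-- with an empty priority list the best accumulator never changes
theorem foldB_nil (files : List String) (b : Option (Nat × String)) :
    files.foldl (updB []) b = b := by
  induction files generalizing b with
  | nil => rfl
  | cons f rest ih =>
    have h2 : PySem.List.index? ([] : List String) (PySem.Str.lower f) = none := by
      rw [PySem.List.index?_eq_none_iff]; simp
    rw [List.foldl_cons, updB_no_idx _ _ h2, ih]

def shiftB (b : Option (Nat × String)) : Option (Nat × String) :=
  b.map (fun p => (p.1 + 1, p.2))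

-- if no file matches the head priority name, the fold for lw::lrest is the fold for lrest, shifted
theorem foldB_shift (lw : String) (lrest : List String) (files : List String)
    (hno : ∀ f ∈ files, PySem.Str.lower f ≠ lw) (b : Option (Nat × String)) :
    files.foldl (updB (lw :: lrest)) (shiftB b) = shiftB (files.foldl (updB lrest) b) := by
  induction files generalizing b with
  | nil => rfl
  | cons f rest ih =>
    have hf : PySem.Str.lower f ≠ lw := hno f (List.mem_cons_self)
    have hno' : ∀ x ∈ rest, PySem.Str.lower x ≠ lw := fun x hx => hno x (List.mem_cons_of_mem _ hx)
    have hstep : updB (lw :: lrest) (shiftB b) f = shiftB (updB lrest b f) := by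
      cases hi : PySem.List.index? lrest (PySem.Str.lower f) with
      | none =>
        have h2 : PySem.List.index? (lw :: lrest) (PySem.Str.lower f) = none := by
          rw [idx_tail lw lrest f hf, hi]; rfl
        rw [updB_no_idx _ _ h2, updB_no_idx _ _ hi]
      | some i =>
        have h2 : PySem.List.index? (lw :: lrest) (PySem.Str.lower f) = some (i + 1) := by
          rw [idx_tail lw lrest f hf, hi]; rfl
        cases b with
        | none =>
          rw [show shiftB none = (none : Option (Nat × String)) from rfl,
            updB_idx_none _ _ (i + 1) h2, updB_idx_none _ _ i hi]
          rfl
        | some p =>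
          obtain ⟨j, g⟩ := p
          rw [show shiftB (some (j, g)) = some (j + 1, g) from rfl,
            updB_idx_some _ _ (i + 1) (j + 1) g h2, updB_idx_some _ _ i j g hi]
          by_cases hij : i ≤ j
          · rw [if_pos (by omega : i + 1 ≤ j + 1), if_pos hij]; rfl
          · rw [if_neg (by omega : ¬ (i + 1 ≤ j + 1)), if_neg hij]; rfl
    rw [List.foldl_cons, hstep, ih hno', List.foldl_cons]

-- main bridge: B's best fold extracts to the same Option String as A's dict + priority scan
theorem bestB_eq_prioA (ps : List String) (files : List String) :
    (match files.foldl (updB (ps.map PySem.Str.lower)) none with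
     | some (_, g) => some g
     | none => none)
      = detectA_prio (files.foldl (fun d f => d.insert (PySem.Str.lower f) f) PySem.Dict.empty) ps := by
  induction ps with
  | nil => simp [foldB_nil, detectA_prio]
  | cons w rest ih =>
    simp only [List.map_cons, detectA_prio, foldl_insert_get]
    by_cases hex : ∃ f ∈ files, PySem.Str.lower f = PySem.Str.lower w
    · have hne : files.reverse.find? (fun x => PySem.Str.lower x == PySem.Str.lower w) ≠ none := by
        intro hn
        rcases hex with ⟨x, hx, hxl⟩
        have := List.find?_eq_none.mp hn x (by simpa using hx)
        simp [hxl] at this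
      rcases Option.ne_none_iff_exists'.mp hne with ⟨h, hfind⟩
      rw [foldB_reach_zero (PySem.Str.lower w) (rest.map PySem.Str.lower) files none
        (Or.inl rfl) hex h hfind]
      simp [hfind]
    · have hno : ∀ f ∈ files, PySem.Str.lower f ≠ PySem.Str.lower w := by
        intro f hf he; exact hex ⟨f, hf, he⟩
      have hfindn : files.reverse.find? (fun x => PySem.Str.lower x == PySem.Str.lower w) = none := by
        rw [List.find?_eq_none]
        intro x hx
        simpa using hno x (by simpa using hx)
      have h0 : (none : Option (Nat × String)) = shiftB none := rfl
      rw [h0, foldB_shift _ _ _ hno, hfindn]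
      simp only [shiftB]
      cases h : files.foldl (updB (rest.map PySem.Str.lower)) none with
      | none => simpa [h] using ih
      | some p => obtain ⟨j, g⟩ := p; simpa [h] using ih

-- ===== VERDICT (by name: the statement is the Claim_ definition above) =====
theorem detect_entry_spec : Claim_equal_detect_entry := by
  intro files priority _
  simp only [Spec_detect_entry, detect_entry, detect_entry_alt, fold_stepB_split]
  rw [← bestB_eq_prioA]
  cases h : files.foldl (updB (priority.map PySem.Str.lower)) none with
  | none => simp [foldH_eq_detectA_html]
  | some p => obtain ⟨j, g⟩ := p; simp
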